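-- pv_equiv track=rewrite | github.com/experiment-lab/CBIR | CbirVersion4.0.py | merge_bins
-- ===== SOURCE A (Python) =====
-- def merge_bins(BBins):
--     Bins = []
--     for i in range(21,256,21):
--         if i == 252:
--             Bins.append(sum(BBins[i-21:]))
--         else:
--             Bins.append(sum(BBins[i-21:i]))
--     return Bins
-- ===== SOURCE B (Python) =====
-- def merge_bins(BBins):
--     n = len(BBins)
--     prefix = [0]
--     acc = 0
--     for x in BBins:
--         acc += x
--         prefix.append(acc)
--     bins = [prefix[min((k + 1) * 21, n)] - prefix[min(k * 21, n)] for k in range(11)]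
--     bins.append(prefix[n] - prefix[min(231, n)])
--     return bins
-- ===== Notes on version B (the rewrite author's own statement) =====
-- stated objective: alternative
-- what changed: Replaces twelve independent slice summations over the histogram by a single prefix-sum accumulation pass followed by differencing at clamped bin boundaries.
import Mathlib
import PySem

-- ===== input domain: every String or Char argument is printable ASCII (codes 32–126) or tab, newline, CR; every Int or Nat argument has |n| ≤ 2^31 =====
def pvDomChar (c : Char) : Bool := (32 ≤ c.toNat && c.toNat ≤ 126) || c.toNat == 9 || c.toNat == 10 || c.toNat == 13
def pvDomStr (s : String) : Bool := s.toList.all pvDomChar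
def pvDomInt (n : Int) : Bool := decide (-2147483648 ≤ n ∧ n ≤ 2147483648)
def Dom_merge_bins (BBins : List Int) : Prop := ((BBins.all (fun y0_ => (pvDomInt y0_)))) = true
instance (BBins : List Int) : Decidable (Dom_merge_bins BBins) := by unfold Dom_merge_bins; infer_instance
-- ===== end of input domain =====

-- B replaces the twelve per-bin slice summations by one prefix-sum pass plus boundary differencing (objective: alternative decomposition).

-- ===== PORT A =====
def merge_bins (BBins : List Int) : List Int :=
  (PySem.List.pyRange 21 256 21).foldl
    (fun Bins i =>
      if i == 252 then
        Bins ++ [(PySem.List.slice BBins (some (i - 21)) none).sum]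
      else
        Bins ++ [(PySem.List.slice BBins (some (i - 21)) (some i)).sum])
    []

-- ===== PORT B =====
-- one step of the prefix-building loop: acc += x; prefix.append(acc)
def pvPrefixStep (st : Int × List Int) (x : Int) : Int × List Int :=
  (st.1 + x, st.2 ++ [st.1 + x])

def merge_bins_alt (BBins : List Int) : List Int :=
  let n := BBins.length
  let pre := (BBins.foldl pvPrefixStep (0, [0])).2
  let bins := (List.range 11).map
    (fun k => pre.getD (min ((k + 1) * 21) n) 0 - pre.getD (min (k * 21) n) 0)
  bins ++ [pre.getD n 0 - pre.getD (min 231 n) 0]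

-- ===== PRECONDITION & SPEC =====
def Spec_merge_bins (BBins : List Int) (out : List Int) : Prop := out = merge_bins_alt BBins
instance (BBins : List Int) (out : List Int) : Decidable (Spec_merge_bins BBins out) := by unfold Spec_merge_bins; infer_instance

-- ===== CLAIM (what is proved, stated in full; the proofs are below) =====
def Claim_equal_merge_bins : Prop := ∀ (BBins : List Int), Dom_merge_bins BBins → Spec_merge_bins BBins (merge_bins BBins)

-- ===== LEMMAS AND PROOFS =====

/-- running partial sums starting from accumulator `a` (proof-side model of the loop) -/
def psums : List Int → Int → List Int
  | [], _ => []
  | x :: xs, a => (a + x) :: psums xs (a + x)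

theorem foldl_pvPrefixStep (xs : List Int) : ∀ (a : Int) (p : List Int),
    xs.foldl pvPrefixStep (a, p) = (a + xs.sum, p ++ psums xs a) := by
  induction xs with
  | nil => intro a p; simp [psums]
  | cons x xs ih =>
      intro a p
      simp [List.foldl, pvPrefixStep, psums, ih, List.append_assoc]
      ring

theorem psums_getD (xs : List Int) : ∀ (a : Int) (i : Nat), i < xs.length →
    (psums xs a).getD i 0 = a + (xs.take (i + 1)).sum := by
  induction xs with
  | nil => intro a i h; simp at h
  | cons x xs ih =>
      intro a i h
      cases i with
      | zero => simp [psums]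
      | succ i =>
          simp only [psums, List.getD_cons_succ, List.take_succ_cons, List.sum_cons]
          rw [ih (a + x) i (by simpa using h)]
          ring

theorem preGetD (xs : List Int) (i : Nat) (h : i ≤ xs.length) :
    (((0 : Int) :: psums xs 0)).getD i 0 = (xs.take i).sum := by
  cases i with
  | zero => simp
  | succ i =>
      rw [List.getD_cons_succ, psums_getD xs 0 i (by omega)]
      ring

theorem take_min_len (xs : List Int) (b : Nat) :
    xs.take (min b xs.length) = xs.take b := by
  rcases Nat.lt_or_ge xs.length b with h | h
  · rw [min_eq_right (le_of_lt h), List.take_length, List.take_of_length_le (le_of_lt h)]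
  · rw [min_eq_left h]

theorem slice_sum (xs : List Int) (a b : Nat) (hab : a ≤ b) :
    (PySem.List.slice xs (some (a : Int)) (some (b : Int))).sum
      = (xs.take b).sum - (xs.take a).sum := by
  rw [PySem.List.slice_toNat _ (by positivity) (by positivity)]
  simp only [Int.toNat_natCast]
  have h : xs.take b = xs.take a ++ (xs.drop a).take (b - a) := by
    rw [← List.take_add]; congr 1; omega
  rw [h, List.sum_append]; ring

theorem bin_eq (xs : List Int) (a b : Nat) (hab : a ≤ b) :
    (PySem.List.slice xs (some (a : Int)) (some (b : Int))).sum
      = ((0 : Int) :: psums xs 0).getD (min b xs.length) 0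
        - ((0 : Int) :: psums xs 0).getD (min a xs.length) 0 := by
  rw [preGetD _ _ (min_le_right _ _), preGetD _ _ (min_le_right _ _),
    take_min_len, take_min_len, slice_sum xs a b hab]

theorem drop_sum (xs : List Int) (a : Nat) :
    (xs.drop a).sum = xs.sum - (xs.take a).sum := by
  have h : (xs.take a).sum + (xs.drop a).sum = xs.sum := by
    rw [← List.sum_append, List.take_append_drop]
  omega

-- ===== VERDICT (by name: the statement is the Claim_ definition above) =====
theorem merge_bins_spec : Claim_equal_merge_bins := by
  intro BBins _
  unfold Spec_merge_bins merge_bins merge_bins_alt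
  rw [show PySem.List.pyRange 21 256 21
        = [21, 42, 63, 84, 105, 126, 147, 168, 189, 210, 231, 252] from by decide]
  rw [foldl_pvPrefixStep]
  simp only [List.foldl, List.range_succ, List.range_zero, List.map, List.nil_append,
    List.map_append, List.nil_append]
  norm_num
  simp only [← List.getD_eq_getElem?_getD]
  refine ⟨?_, ?_, ?_, ?_, ?_, ?_, ?_, ?_, ?_, ?_, ?_, ?_⟩
  · rw [PySem.List.slice_to _ (by omega), preGetD _ _ (min_le_right _ _), take_min_len,
      show Int.toNat 21 = 21 from rfl]
  · exact_mod_cast bin_eq BBins 21 42 (by omega)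
  · exact_mod_cast bin_eq BBins 42 63 (by omega)
  · exact_mod_cast bin_eq BBins 63 84 (by omega)
  · exact_mod_cast bin_eq BBins 84 105 (by omega)
  · exact_mod_cast bin_eq BBins 105 126 (by omega)
  · exact_mod_cast bin_eq BBins 126 147 (by omega)
  · exact_mod_cast bin_eq BBins 147 168 (by omega)
  · exact_mod_cast bin_eq BBins 168 189 (by omega)
  · exact_mod_cast bin_eq BBins 189 210 (by omega)
  · exact_mod_cast bin_eq BBins 210 231 (by omega)
  · rw [PySem.List.slice_from _ (by omega), preGetD _ _ (le_refl _),
      preGetD _ _ (min_le_right _ _), take_min_len, List.take_length, drop_sum,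
      show Int.toNat 231 = 231 from rfl]
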